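-- pv_equiv track=rewrite | github.com/balta2ar/srs-toolbelt | yatetradki/uitools/uttale/uttale.py | get_subtitle_index
-- ===== SOURCE A (Python) =====
-- def get_subtitle_index(vtt_content, raw_line_number):
--     subtitle_count = -1
--     for i, line in enumerate(vtt_content):
--         if i + 1 >= raw_line_number:
--             return max(0, subtitle_count)
--         if line.strip() and not line.strip().isdigit() and ' --> ' not in line:
--             subtitle_count += 1
--     return None
-- ===== SOURCE B (Python) =====
-- def get_subtitle_index(vtt_content, raw_line_number):
--     # Stage 1: prefix-sum table; sums[k] = number of subtitle text lines among the first k lines.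
--     sums = [0]
--     total = 0
--     for line in vtt_content:
--         if line.strip() and not line.strip().isdigit() and ' --> ' not in line:
--             total += 1
--         sums.append(total)
--     # Stage 2: answer by table lookup.
--     if not vtt_content or len(vtt_content) < raw_line_number:
--         return None
--     k = max(0, raw_line_number - 1)
--     return max(0, sums[k] - 1)
-- ===== Notes on version B (the rewrite author's own statement) =====
-- stated objective: alternative
-- what changed: B replaces A's single interleaved scan (enumerate with an early return and a running counter started at -1) by a two-stage table algorithm: it first builds a full prefix-sum table of qualifying-line counts over the whole list, then answers None or a clamped table lookup sums[max(0, raw_line_number-1)] - 1.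
import Mathlib
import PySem

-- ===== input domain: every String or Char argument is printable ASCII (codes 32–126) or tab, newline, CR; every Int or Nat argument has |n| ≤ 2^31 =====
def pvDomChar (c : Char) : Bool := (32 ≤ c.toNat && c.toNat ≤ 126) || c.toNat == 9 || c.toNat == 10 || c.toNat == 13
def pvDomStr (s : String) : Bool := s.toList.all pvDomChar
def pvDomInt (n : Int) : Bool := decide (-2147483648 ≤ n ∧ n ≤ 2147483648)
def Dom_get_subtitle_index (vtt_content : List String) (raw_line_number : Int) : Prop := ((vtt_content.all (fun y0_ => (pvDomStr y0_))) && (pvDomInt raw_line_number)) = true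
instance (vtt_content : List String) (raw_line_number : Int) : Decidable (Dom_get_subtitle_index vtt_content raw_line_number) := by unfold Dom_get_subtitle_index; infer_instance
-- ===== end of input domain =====

-- B builds a full prefix-sum table of qualifying-line counts once, then answers by table lookup (alternative decomposition).

-- shared helper: the Python condition
-- "line.strip() and not line.strip().isdigit() and ' --> ' not in line"
def pvIsTextLine (line : String) : Bool :=
  PySem.Str.strip line ≠ "" && !(PySem.Str.strIsdigit (PySem.Str.strip line)) && !(PySem.Str.isIn " --> " line)

-- ===== PORT A =====
-- A's loop: enumerate with early return, counter starting at -1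
def pvLoopA (lines : List String) (i : Int) (cnt : Int) (rn : Int) : Option Int :=
  match lines with
  | [] => none
  | l :: ls =>
      if i + 1 ≥ rn then some (max 0 cnt)
      else pvLoopA ls (i + 1) (if pvIsTextLine l then cnt + 1 else cnt) rn

def get_subtitle_index (vtt_content : List String) (raw_line_number : Int) : Option Int :=
  pvLoopA vtt_content 0 (-1) raw_line_number

-- ===== PORT B =====
-- Stage 1 of Source B: the loop appending the running total to the table
def pvBuildSums (lines : List String) (sums : List Int) (total : Int) : List Int :=
  match lines with
  | [] => sums
  | l :: ls =>
      let t := if pvIsTextLine l then total + 1 else total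
      pvBuildSums ls (sums ++ [t]) t

def get_subtitle_index_alt (vtt_content : List String) (raw_line_number : Int) : Option Int :=
  let sums := pvBuildSums vtt_content [0] 0
  if vtt_content = [] ∨ (vtt_content.length : Int) < raw_line_number then none
  else
    let k := (max 0 (raw_line_number - 1)).toNat
    -- sums[k]: the index is provably in range here (k ≤ length vtt_content < length sums)
    some (max 0 (sums.getD k 0 - 1))

-- ===== PRECONDITION & SPEC =====
def Spec_get_subtitle_index (vtt_content : List String) (raw_line_number : Int) (out : Option Int) : Prop := out = get_subtitle_index_alt vtt_content raw_line_number
instance (vtt_content : List String) (raw_line_number : Int) (out : Option Int) : Decidable (Spec_get_subtitle_index vtt_content raw_line_number out) := by unfold Spec_get_subtitle_index; infer_instance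

-- ===== CLAIM =====
def Claim_equal_get_subtitle_index : Prop := ∀ (vtt_content : List String) (raw_line_number : Int), Dom_get_subtitle_index vtt_content raw_line_number → Spec_get_subtitle_index vtt_content raw_line_number (get_subtitle_index vtt_content raw_line_number)

-- ===== LEMMAS AND PROOFS =====

-- characterisation of A's loop, generalising the index and counter
theorem pvLoopA_eq (lines : List String) : ∀ (i cnt rn : Int),
    pvLoopA lines i cnt rn =
      if lines = [] ∨ (lines.length : Int) < rn - i then none
      else some (max 0 (cnt + ((lines.take (rn - 1 - i).toNat).countP pvIsTextLine : Int))) := by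
  induction lines with
  | nil => intro i cnt rn; simp [pvLoopA]
  | cons l ls ih =>
    intro i cnt rn
    simp only [pvLoopA]
    by_cases h : i + 1 ≥ rn
    · have h0 : (rn - 1 - i).toNat = 0 := by omega
      have h1 : ¬ ((l :: ls) = [] ∨ ((l :: ls).length : Int) < rn - i) := by
        refine not_or.mpr ⟨by simp, ?_⟩
        simp only [List.length_cons]; push_cast; omega
      rw [if_pos h, if_neg h1, h0]
      simp
    · rw [if_neg h, ih]
      have htk : (rn - 1 - i).toNat = (rn - 1 - (i + 1)).toNat + 1 := by omega
      by_cases hl : (ls.length : Int) < rn - (i + 1)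
      · rw [if_pos (Or.inr hl),
           if_pos (Or.inr (show ((l :: ls).length : Int) < rn - i by
             simp only [List.length_cons]; push_cast; omega))]
      · have hlsne : ls ≠ [] := by intro he; subst he; simp at hl; omega
        rw [if_neg (not_or.mpr ⟨hlsne, hl⟩),
            if_neg (not_or.mpr ⟨by simp, by
              simp only [List.length_cons]; push_cast; omega⟩)]
        rw [htk, List.take_succ_cons, List.countP_cons]
        simp only [Option.some.injEq]
        split_ifs with hp <;> push_cast <;> omega

-- pvBuildSums only appends: it equals the initial accumulator ++ a tail that is independent of it
def pvTail (lines : List String) (t : Int) : List Int :=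
  match lines with
  | [] => []
  | l :: ls =>
      let t' := if pvIsTextLine l then t + 1 else t
      t' :: pvTail ls t'

theorem pvBuildSums_eq (lines : List String) : ∀ (sums : List Int) (t : Int),
    pvBuildSums lines sums t = sums ++ pvTail lines t := by
  induction lines with
  | nil => intro sums t; simp [pvBuildSums, pvTail]
  | cons l ls ih =>
    intro sums t
    simp [pvBuildSums, pvTail, ih]

-- the table entry at k is the count of text lines in the first k lines
theorem pvTail_getD (lines : List String) : ∀ (k : ℕ) (t : Int), k ≤ lines.length →
    (t :: pvTail lines t).getD k 0 = t + ((lines.take k).countP pvIsTextLine : Int) := by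
  induction lines with
  | nil =>
    intro k t hk
    have hk0 : k = 0 := by simpa using hk
    subst hk0; simp
  | cons l ls ih =>
    intro k t hk
    cases k with
    | zero => simp
    | succ j =>
      have hj : j ≤ ls.length := by simpa using hk
      simp only [pvTail, List.getD_cons_succ]
      rw [ih j _ hj, List.take_succ_cons, List.countP_cons]
      split_ifs with hp <;> push_cast <;> omega

theorem get_subtitle_index_spec : Claim_equal_get_subtitle_index := by
  intro v rn _
  unfold Spec_get_subtitle_index get_subtitle_index get_subtitle_index_alt
  rw [pvLoopA_eq, pvBuildSums_eq]
  by_cases h : v = [] ∨ (v.length : Int) < rn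
  · rw [if_pos (by simpa using h), if_pos h]
  · rw [if_neg (by simpa using h), if_neg h]
    push Not at h
    obtain ⟨hne, hlen⟩ := h
    have hk : (max 0 (rn - 1)).toNat ≤ v.length := by omega
    have := pvTail_getD v (max 0 (rn - 1)).toNat 0 hk
    simp only [List.singleton_append]
    rw [this]
    have e : (rn - 1 - 0 : Int).toNat = (max 0 (rn - 1)).toNat := by omega
    rw [e]
    simp only [Option.some.injEq]
    omega
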